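-- pv_equiv track=rewrite | github.com/anuradhawick/algo-competitions | Project-Euler/51.py | get_replaceables
-- ===== SOURCE A (Python) =====
-- from collections import Counter
--
-- def get_replaceables(num, replace_count):
--     num = str(num)
--     chars = list(num)
--     counts = Counter(chars)
--     replace_max = 9 - replace_count
--
--     positions = []
--
--     for char, count in counts.items():
--         if int(char) <= replace_max:
--             pos = [n for n, c in enumerate(chars[:-1]) if c == char]
--             if len(pos):
--                 positions += [pos]
--
--     return positions
-- ===== SOURCE B (Python) =====
-- def get_replaceables(num, replace_count):
--     chars = str(num)
--     idx = {}
--     for n, c in enumerate(chars[:-1]):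
--         idx.setdefault(c, []).append(n)
--     replace_max = 9 - replace_count
--     return [pos for c, pos in idx.items() if int(c) <= replace_max]
-- ===== Notes on version B (the rewrite author's own statement) =====
-- stated objective: alternative
-- what changed: B replaces A's per-distinct-digit rescans of the string (Counter plus a fresh enumerate comprehension for every key) with one grouping pass that builds a dict from each char to its index list, then filters that dict's items once.
import Mathlib
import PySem

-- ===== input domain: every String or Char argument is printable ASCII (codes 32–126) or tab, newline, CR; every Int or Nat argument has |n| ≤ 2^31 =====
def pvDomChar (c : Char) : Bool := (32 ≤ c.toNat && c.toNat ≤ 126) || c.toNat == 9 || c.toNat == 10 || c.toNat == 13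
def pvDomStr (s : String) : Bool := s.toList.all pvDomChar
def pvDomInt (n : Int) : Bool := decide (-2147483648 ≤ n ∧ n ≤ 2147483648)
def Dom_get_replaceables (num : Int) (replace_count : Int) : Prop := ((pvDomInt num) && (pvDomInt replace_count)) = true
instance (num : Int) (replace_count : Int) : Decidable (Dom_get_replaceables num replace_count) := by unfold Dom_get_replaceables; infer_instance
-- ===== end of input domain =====

-- B groups the digit positions in one pass over enumerate(str(num)[:-1]) into a dict and filters its
-- items once, instead of A's Counter plus a fresh rescan of the string per distinct digit ("alternative").

-- ===== PORT A =====
def get_replaceables (num : Int) (replace_count : Int) : List (List Int) :=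
  let chars := PySem.Int.toChars num               -- num = str(num); chars = list(num)
  let counts := PySem.Dict.counter chars           -- counts = Counter(chars)
  let replace_max := 9 - replace_count
  -- for char, count in counts.items(): if int(char) <= replace_max: …
  -- int(char) is ported as (ofChars? [char]).getD 0: Pre_ (0 ≤ num) makes every char a digit,
  -- where ofChars? returns some — exact there; on negative num Python raises ValueError (excluded).
  counts.items.foldl (fun positions cc =>
    if (PySem.Int.ofChars? [cc.1]).getD 0 ≤ replace_max then
      let pos := ((PySem.List.enumerate (PySem.List.slice chars none (some (-1))) 0).filter
        (fun nc => nc.2 == cc.1)).map (fun nc => nc.1)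
      if pos.length ≠ 0 then positions ++ [pos] else positions
    else positions) []

-- ===== PORT B =====
def get_replaceables_alt (num : Int) (replace_count : Int) : List (List Int) :=
  let chars := PySem.Int.toChars num               -- chars = str(num)
  -- for n, c in enumerate(chars[:-1]): idx.setdefault(c, []).append(n)
  let idx := (PySem.List.enumerate (PySem.List.slice chars none (some (-1))) 0).foldl
    (fun d nc => d.modify nc.2 [] (fun l => l ++ [nc.1])) PySem.Dict.empty
  let replace_max := 9 - replace_count
  -- [pos for c, pos in idx.items() if int(c) <= replace_max]   (int(c) ported as in port A)
  idx.items.filterMap (fun cp =>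
    if (PySem.Int.ofChars? [cp.1]).getD 0 ≤ replace_max then some cp.2 else none)

-- ===== PRECONDITION & SPEC =====
-- Pre_ excludes exactly the inputs where Python A raises: for num < 0 the first Counter key is '-'
-- and int('-') raises ValueError (B raises there too).
def Pre_get_replaceables (num : Int) (replace_count : Int) : Prop := 0 ≤ num
instance (num : Int) (replace_count : Int) : Decidable (Pre_get_replaceables num replace_count) := by unfold Pre_get_replaceables; infer_instance
def pvWitness_get_replaceables : Int × Int := (56003, 3)

def Spec_get_replaceables (num : Int) (replace_count : Int) (out : List (List Int)) : Prop := out = get_replaceables_alt num replace_count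
instance (num : Int) (replace_count : Int) (out : List (List Int)) : Decidable (Spec_get_replaceables num replace_count out) := by unfold Spec_get_replaceables; infer_instance

-- ===== CLAIM (what is proved, stated in full; the proofs are below) =====
def Claim_equal_get_replaceables : Prop := ∀ (num : Int) (replace_count : Int), Dom_get_replaceables num replace_count → Pre_get_replaceables num replace_count → Spec_get_replaceables num replace_count (get_replaceables num replace_count)

-- ===== LEMMAS AND PROOFS =====

-- positions of c in init, as both programs compute them
def pvPosOf (init : List Char) (c : Char) : List Int :=
  ((PySem.List.enumerate init 0).filter (fun nc => nc.2 == c)).map (fun nc => nc.1)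

theorem pvPosOf_ne_nil_iff (init : List Char) (c : Char) :
    (pvPosOf init c).length ≠ 0 ↔ c ∈ init := by
  unfold pvPosOf
  simp [List.length_eq_zero_iff, List.filter_eq_nil_iff, PySem.List.mem_enumerate_iff]
  constructor
  · rintro ⟨k, hk, h⟩; exact h ▸ List.getElem_mem hk
  · intro h
    obtain ⟨k, hk, he⟩ := List.mem_iff_getElem.mp h
    exact ⟨k, hk, he⟩

-- B's dict, characterised: its items are the distinct chars of init in first-occurrence order,
-- each paired with its position list
theorem pvIdx_items (init : List Char) :
    ((PySem.List.enumerate init 0).foldl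
      (fun d nc => d.modify nc.2 [] (fun l => l ++ [nc.1])) PySem.Dict.empty).items
    = (PySem.Set.ofList init).map (fun c => (c, pvPosOf init c)) := by
  have hkeys : ((PySem.List.enumerate init 0).foldl
      (fun d nc => d.modify nc.2 [] (fun l => l ++ [nc.1])) PySem.Dict.empty).keys
      = PySem.Set.ofList init := by
    have := PySem.Dict.keys_foldl_modify_key (PySem.List.enumerate init 0)
      (fun nc => nc.2) [] (fun _ nc l => l ++ [nc.1]) PySem.Dict.empty
    simpa [PySem.List.map_snd_enumerate, PySem.Set.update, PySem.Set.ofList_eq_foldl] using this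
  have hnd : ((PySem.List.enumerate init 0).foldl
      (fun d nc => d.modify nc.2 [] (fun l => l ++ [nc.1])) PySem.Dict.empty).keys.Nodup :=
    PySem.Dict.nodup_keys_foldl_modify_key _ (fun nc : Int × Char => nc.2) []
      (fun _ nc l => l ++ [nc.1]) _ (by simp)
  have hgetD : ∀ c, ((PySem.List.enumerate init 0).foldl
      (fun d nc => d.modify nc.2 [] (fun l => l ++ [nc.1])) PySem.Dict.empty).getD c []
      = pvPosOf init c := by
    intro c
    have hswap : (PySem.List.enumerate init 0).foldl
        (fun d nc => d.modify nc.2 [] (fun l => l ++ [nc.1])) PySem.Dict.empty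
      = ((PySem.List.enumerate init 0).map Prod.swap).foldl
        (fun d p => d.modify p.1 [] (fun l => l ++ [p.2])) PySem.Dict.empty := by
      rw [List.foldl_map]; simp
    rw [hswap, PySem.Dict.getD_foldl_modify_append]
    unfold pvPosOf
    simp [List.filter_map, List.map_map, Function.comp_def, Prod.swap]
  rw [PySem.Dict.items_eq_map_keys _ hnd [], hkeys]
  exact List.map_congr_left (fun c _ => by rw [hgetD c])

theorem pvFilterMap_if {α β : Type} (p : α → Bool) (g : α → β) (l : List α) :
    l.filterMap (fun c => if p c then some (g c) else none) = (l.filter p).map g := by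
  induction l with
  | nil => rfl
  | cons x xs ih => by_cases h : p x <;> simp [h, ih]

-- dropping the chars that occur only at the last position keeps first-occurrence order
theorem pvOfList_filter_mem_dropLast (init : List Char) (x : Char) :
    (PySem.Set.ofList (init ++ [x])).filter (fun c => decide (c ∈ init)) = PySem.Set.ofList init := by
  have happ : PySem.Set.ofList (init ++ [x]) = PySem.Set.add (PySem.Set.ofList init) x := by
    simp [PySem.Set.ofList_eq_foldl, List.foldl_append]
  rw [happ]
  have hself : (PySem.Set.ofList init).filter (fun c => decide (c ∈ init)) = PySem.Set.ofList init :=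
    List.filter_eq_self.mpr (fun c hc => by simpa using (PySem.Set.mem_ofList init c).mp hc)
  by_cases hx : x ∈ init
  · have hc : PySem.Set.contains (PySem.Set.ofList init) x = true := by
      simp [pysem, PySem.Set.contains, hx]
    simp only [PySem.Set.add, hc, if_pos]
    exact hself
  · have hc : PySem.Set.contains (PySem.Set.ofList init) x = false := by
      simp [pysem, PySem.Set.contains, hx]
    simp only [PySem.Set.add, hc, Bool.false_eq_true, if_neg, not_false_iff]
    rw [List.filter_append, hself]
    simp [hx]

-- A's loop over Counter.items, characterised (stated over any key list and count function)
theorem pvFoldA (rmax : Int) (init : List Char) (l : List Char) (cnt : Char → Int)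
    (acc : List (List Int)) :
    (l.map (fun k => (k, cnt k))).foldl (fun positions (cc : Char × Int) =>
      if (PySem.Int.ofChars? [cc.1]).getD 0 ≤ rmax then
        let pos := pvPosOf init cc.1
        if pos.length ≠ 0 then positions ++ [pos] else positions
      else positions) acc
    = acc ++ (l.filter (fun k => decide ((PySem.Int.ofChars? [k]).getD 0 ≤ rmax)
        && decide ((pvPosOf init k).length ≠ 0))).map (pvPosOf init) := by
  have hbody : (fun (positions : List (List Int)) (cc : Char × Int) =>
      if (PySem.Int.ofChars? [cc.1]).getD 0 ≤ rmax then
        let pos := pvPosOf init cc.1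
        if pos.length ≠ 0 then positions ++ [pos] else positions
      else positions)
      = (fun positions cc =>
        if (decide ((PySem.Int.ofChars? [cc.1]).getD 0 ≤ rmax)
            && decide ((pvPosOf init cc.1).length ≠ 0)) = true
        then positions ++ [pvPosOf init cc.1] else positions) := by
    funext acc cc
    by_cases h1 : (PySem.Int.ofChars? [cc.1]).getD 0 ≤ rmax <;>
      by_cases h2 : (pvPosOf init cc.1).length ≠ 0 <;> simp [h1, h2]
  rw [hbody, PySem.List.foldl_append_if, List.filter_map, List.map_map]
  rfl

-- the two iterations agree list-for-list
theorem pvMain (chars : List Char) (rmax : Int) :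
    (PySem.Dict.counter chars).items.foldl (fun positions (cc : Char × Int) =>
      if (PySem.Int.ofChars? [cc.1]).getD 0 ≤ rmax then
        let pos := ((PySem.List.enumerate (PySem.List.slice chars none (some (-1))) 0).filter
          (fun nc => nc.2 == cc.1)).map (fun nc => nc.1)
        if pos.length ≠ 0 then positions ++ [pos] else positions
      else positions) []
    = (((PySem.List.enumerate (PySem.List.slice chars none (some (-1))) 0).foldl
        (fun d nc => d.modify nc.2 [] (fun l => l ++ [nc.1])) PySem.Dict.empty).items).filterMap
      (fun cp => if (PySem.Int.ofChars? [cp.1]).getD 0 ≤ rmax then some cp.2 else none) := by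
  rw [PySem.List.slice_to_neg_one]
  set P : Char → Bool := fun c => decide ((PySem.Int.ofChars? [c]).getD 0 ≤ rmax) with hP
  have hB : (((PySem.List.enumerate chars.dropLast 0).foldl
        (fun d nc => d.modify nc.2 [] (fun l => l ++ [nc.1])) PySem.Dict.empty).items).filterMap
      (fun cp => if (PySem.Int.ofChars? [cp.1]).getD 0 ≤ rmax then some cp.2 else none)
      = ((PySem.Set.ofList chars.dropLast).filter P).map (pvPosOf chars.dropLast) := by
    rw [pvIdx_items, List.filterMap_map, ← pvFilterMap_if P (pvPosOf chars.dropLast)]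
    exact List.filterMap_congr (fun c _ => by simp [hP, Function.comp])
  have hA := pvFoldA rmax chars.dropLast (PySem.Set.ofList chars)
    (fun k => (List.count k chars : Int)) []
  rw [hB, PySem.Dict.items_counter]
  refine hA.trans ?_
  have hq : (PySem.Set.ofList chars).filter (fun k => decide ((PySem.Int.ofChars? [k]).getD 0 ≤ rmax)
        && decide ((pvPosOf chars.dropLast k).length ≠ 0))
      = (PySem.Set.ofList chars.dropLast).filter P := by
    have hcongr : (PySem.Set.ofList chars).filter (fun k => decide ((PySem.Int.ofChars? [k]).getD 0 ≤ rmax)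
          && decide ((pvPosOf chars.dropLast k).length ≠ 0))
        = (PySem.Set.ofList chars).filter (fun k => P k && decide (k ∈ chars.dropLast)) :=
      List.filter_congr (fun k _ => by
        rw [decide_eq_decide.mpr (pvPosOf_ne_nil_iff chars.dropLast k)])
    rw [hcongr, ← List.filter_filter]
    rcases List.eq_nil_or_concat chars with hnil | ⟨ys, x, hys⟩
    · subst hnil; simp [PySem.Set.ofList]
    · subst hys
      simp only [List.concat_eq_append, List.dropLast_concat]
      rw [pvOfList_filter_mem_dropLast]
  rw [hq]
  simp

-- ===== VERDICT (by name: the statement is the Claim_ definition above) =====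
theorem get_replaceables_spec : Claim_equal_get_replaceables := by
  intro num rc _ _
  unfold Spec_get_replaceables get_replaceables get_replaceables_alt
  exact pvMain (PySem.Int.toChars num) (9 - rc)
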